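-- pv_equiv track=rewrite | github.com/Chronona/PyCheckioSolutions | py_checkio_solutions/Alice In Wonderland/zigzag_array.py | create_zigzag
-- ===== SOURCE A (Python) =====
-- from typing import List
--
-- def create_zigzag(rows: int, cols: int, start: int = 1) -> List[List[int]]:
--     result = []
--     if rows == 0:
--         return result
--     if cols == 0:
--         result = [[] for i in range(rows)]
--         return result
--     maximum = start + rows * cols
--     number_list = []
--     is_reversed = False
--     count = start
--     while count <= maximum:
--         if len(number_list) < cols:
--             number_list.append(count)
--             count += 1
--         else:
--             if is_reversed:
--                 number_list = number_list[::-1]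
--                 is_reversed = False
--             else:
--                 is_reversed = True
--             result.append(number_list)
--             number_list = []
--     return result
-- ===== SOURCE B (Python) =====
-- def create_zigzag(rows: int, cols: int, start: int = 1):
--     grid = []
--     for r in range(rows):
--         row = [start + r * cols + c for c in range(cols)]
--         if r % 2 == 1:
--             row.reverse()
--         grid.append(row)
--     return grid
-- ===== Notes on version B (the rewrite author's own statement) =====
-- stated objective: simpler
-- what changed: Replaced A's flat while-loop over a shared buffer with toggling is_reversed/flush state by a per-row loop that builds each row directly from the closed-form offset start + r*cols and reverses odd rows (no per-element buffer management).
-- outside the precondition, e.g. on create_zigzag(2, -1, 1): A returns [], B returns [[], []]; on create_zigzag(-1, -1, 1): A does not finish within the time limit, B returns []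
import Mathlib
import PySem

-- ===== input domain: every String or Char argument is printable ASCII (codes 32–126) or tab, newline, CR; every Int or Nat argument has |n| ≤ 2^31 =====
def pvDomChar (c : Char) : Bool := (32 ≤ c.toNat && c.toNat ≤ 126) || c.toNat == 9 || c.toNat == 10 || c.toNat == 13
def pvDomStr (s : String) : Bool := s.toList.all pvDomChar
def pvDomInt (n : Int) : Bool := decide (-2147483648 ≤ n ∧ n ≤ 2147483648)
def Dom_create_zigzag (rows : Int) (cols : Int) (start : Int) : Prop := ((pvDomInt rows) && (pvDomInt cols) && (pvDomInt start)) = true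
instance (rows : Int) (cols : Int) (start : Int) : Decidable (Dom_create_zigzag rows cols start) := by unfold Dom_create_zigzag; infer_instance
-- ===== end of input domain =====

-- B builds each row directly from the closed-form offset start + r*cols (reversing odd rows)
-- instead of A's flat while-loop over a shared buffer with a toggling is_reversed flag; simpler, same cost.

-- ===== PORT A =====
-- the while-loop of A; fuel only makes the recursion total (A diverges when rows < 0 and cols < 0,
-- which Pre_ excludes); on every admitted input the fuel given below is enough, proved in the lemmas.
def createZigzagLoop (cols maximum : Int) : Nat → List (List Int) → List Int → Bool → Int → List (List Int)
  | 0, result, _, _, _ => result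
  | fuel+1, result, number_list, is_reversed, count =>
    if count ≤ maximum then
      if (number_list.length : Int) < cols then
        createZigzagLoop cols maximum fuel result (number_list ++ [count]) is_reversed (count + 1)
      else
        if is_reversed then
          createZigzagLoop cols maximum fuel (result ++ [number_list.reverse]) [] false count
        else
          createZigzagLoop cols maximum fuel (result ++ [number_list]) [] true count
    else result

def create_zigzag (rows : Int) (cols : Int) (start : Int) : List (List Int) :=
  if rows = 0 then []
  else if cols = 0 then (List.range rows.toNat).map (fun _ => ([] : List Int))
  else createZigzagLoop cols (start + rows * cols) (rows.toNat * (cols.toNat + 1) + 2) [] [] false start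

-- ===== PORT B =====
def create_zigzag_alt (rows : Int) (cols : Int) (start : Int) : List (List Int) :=
  (PySem.List.pyRange 0 rows 1).foldl (fun grid r =>
    let row := (PySem.List.pyRange 0 cols 1).map (fun c => start + r * cols + c)
    let row := if PySem.Int.mod r 2 = 1 then row.reverse else row
    grid ++ [row]) []

-- ===== PRECONDITION & SPEC =====
-- Pre_ excludes cols < 0, a degenerate shape on which A either diverges (rows < 0) or returns the
-- accidental [] instead of rows rows (rows > 0); B returns the rows empty-ish rows its comprehension yields.
def Pre_create_zigzag (rows : Int) (cols : Int) (start : Int) : Prop := 0 ≤ cols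
instance (rows : Int) (cols : Int) (start : Int) : Decidable (Pre_create_zigzag rows cols start) := by unfold Pre_create_zigzag; infer_instance
def pvWitness_create_zigzag : Int × Int × Int := (3, 4, 1)
def Spec_create_zigzag (rows : Int) (cols : Int) (start : Int) (out : List (List Int)) : Prop := out = create_zigzag_alt rows cols start
instance (rows : Int) (cols : Int) (start : Int) (out : List (List Int)) : Decidable (Spec_create_zigzag rows cols start out) := by unfold Spec_create_zigzag; infer_instance

-- ===== CLAIM (what is proved, stated in full; the proofs are below) =====
def Claim_equal_create_zigzag : Prop := ∀ (rows : Int) (cols : Int) (start : Int), Dom_create_zigzag rows cols start → Pre_create_zigzag rows cols start → Spec_create_zigzag rows cols start (create_zigzag rows cols start)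

-- ===== LEMMAS AND PROOFS =====

-- the consecutive integers off, off+1, …, off+n-1
def zseq (off : Int) (n : Nat) : List Int := (List.range n).map (fun (j : Nat) => off + (j : Int))

-- the i-th zigzag row starting at offset c, with initial reversal flag rev
def zrowR (cols : Int) (rev : Bool) (c : Int) (i : Nat) : List Int :=
  let row := zseq (c + (i : Int) * cols) cols.toNat
  if (rev != decide (i % 2 = 1)) then row.reverse else row

lemma foldl_push {α β : Type} (f : α → β) : ∀ (l : List α) (init : List β),
    l.foldl (fun acc x => acc ++ [f x]) init = init ++ l.map f := by
  intro l
  induction l with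
  | nil => simp
  | cons a t ih => intro init; simp [List.foldl_cons, ih]

lemma zseq_length (off : Int) (n : Nat) : (zseq off n).length = n := by simp [zseq]

lemma zseq_succ_cons (off : Int) (n : Nat) : zseq off (n + 1) = off :: zseq (off + 1) n := by
  unfold zseq
  rw [List.range_succ_eq_map]
  simp only [List.map_cons, List.map_map, Nat.cast_zero, add_zero]
  congr 1
  apply List.map_congr_left
  intro j _
  simp only [Function.comp]
  push_cast
  ring

lemma alt_closed (rows cols start : Int) :
    create_zigzag_alt rows cols start
      = (List.range rows.toNat).map (zrowR cols false start) := by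
  unfold create_zigzag_alt
  rw [PySem.List.pyRange_one 0 rows]
  rw [List.foldl_map, foldl_push]
  simp only [List.nil_append, sub_zero]
  apply List.map_congr_left
  intro k _
  have hm : PySem.Int.mod ((0 : Int) + (k : Int)) 2 = ((0 : Int) + (k : Int)) % 2 := by
    apply PySem.Int.mod_eq_emod_of_pos
    norm_num
  have hrow : (PySem.List.pyRange 0 cols 1).map (fun c => start + ((0 : Int) + (k : Int)) * cols + c)
      = zseq (start + (k : Int) * cols) cols.toNat := by
    rw [PySem.List.pyRange_one]
    unfold zseq
    rw [List.map_map]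
    simp only [sub_zero]
    apply List.map_congr_left
    intro j _
    simp only [Function.comp]
    ring
  simp only [hm, hrow, zrowR]
  by_cases hp : k % 2 = 1
  · rw [if_pos (by omega : ((0 : Int) + (k : Int)) % 2 = 1), if_pos (by simp [hp])]
  · rw [if_neg (by omega : ¬ (((0 : Int) + (k : Int)) % 2 = 1)), if_neg (by simp [hp])]

lemma fill (cols maximum : Int) : ∀ (m f : Nat) (res : List (List Int)) (p : List Int) (rev : Bool) (c : Int),
    (p.length : Int) + m = cols → c + m ≤ maximum →
    createZigzagLoop cols maximum (m + f) res p rev c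
      = createZigzagLoop cols maximum f res (p ++ zseq c m) rev (c + m) := by
  intro m
  induction m with
  | zero => intro f res p rev c h1 h2; simp [zseq]
  | succ m ih =>
    intro f res p rev c h1 h2
    have hstep : m + 1 + f = (m + f) + 1 := by omega
    rw [hstep]
    have hc : c ≤ maximum := by omega
    have hl : (p.length : Int) < cols := by omega
    rw [createZigzagLoop, if_pos hc, if_pos hl]
    rw [ih f res (p ++ [c]) rev (c + 1) (by simp; omega) (by omega)]
    rw [zseq_succ_cons]
    have harr : p ++ [c] ++ zseq (c + 1) m = p ++ c :: zseq (c + 1) m := by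
      rw [List.append_assoc]; rfl
    rw [harr]
    congr 1
    push_cast
    ring

lemma rowstep (cols maximum : Int) (hc : 0 < cols) (f : Nat) (res : List (List Int)) (rev : Bool) (c : Int)
    (hle : c + cols ≤ maximum) :
    createZigzagLoop cols maximum (cols.toNat + 1 + f) res [] rev c
      = createZigzagLoop cols maximum f
          (res ++ [if rev then (zseq c cols.toNat).reverse else zseq c cols.toNat])
          [] (!rev) (c + cols) := by
  have hcast : ((cols.toNat : Int)) = cols := Int.toNat_of_nonneg (le_of_lt hc)
  have h1 : cols.toNat + 1 + f = cols.toNat + (1 + f) := by omega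
  rw [h1, fill cols maximum cols.toNat (1 + f) res [] rev c (by simp [hcast]) (by omega)]
  have h2 : c + (cols.toNat : Int) = c + cols := by rw [hcast]
  rw [h2]
  have h3 : (1 + f) = (f + 1) := by omega
  rw [h3, createZigzagLoop, if_pos hle]
  have hlen : ¬ (((((List.nil : List Int) ++ zseq c cols.toNat).length : Int)) < cols) := by
    simp [zseq_length, hcast]
  rw [if_neg hlen]
  cases rev with
  | false => simp
  | true => simp

lemma rowsLoop (cols maximum : Int) (hc : 0 < cols) : ∀ (n f : Nat) (res : List (List Int)) (rev : Bool) (c : Int),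
    c + (n : Int) * cols = maximum →
    createZigzagLoop cols maximum (n * (cols.toNat + 1) + 2 + f) res [] rev c
      = res ++ (List.range n).map (zrowR cols rev c) := by
  intro n
  induction n with
  | zero =>
    intro f res rev c hmax
    simp only [Nat.cast_zero, zero_mul, add_zero] at hmax
    have h1 : 0 * (cols.toNat + 1) + 2 + f = (f + 1) + 1 := by omega
    rw [h1, createZigzagLoop]
    rw [if_pos (by omega : c ≤ maximum), if_pos (by simpa using hc)]
    rw [createZigzagLoop, if_neg (by omega : ¬ (c + 1 ≤ maximum))]
    simp
  | succ n ih =>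
    intro f res rev c hmax
    have h1 : (n + 1) * (cols.toNat + 1) + 2 + f = cols.toNat + 1 + (n * (cols.toNat + 1) + 2 + f) := by ring
    have hn : (0 : Int) ≤ (n : Int) * cols := mul_nonneg (by positivity) (le_of_lt hc)
    have hle : c + cols ≤ maximum := by push_cast at hmax ⊢; nlinarith
    rw [h1, rowstep cols maximum hc _ res rev c hle]
    rw [ih f _ (!rev) (c + cols) (by push_cast at hmax ⊢; linarith [hmax])]
    rw [List.append_assoc]
    congr 1
    rw [List.range_succ_eq_map, List.map_cons, List.map_map, List.singleton_append]
    congr 1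
    · unfold zrowR
      simp
    · apply List.map_congr_left
      intro i _
      unfold zrowR
      simp only [Function.comp]
      have hoff : (c + cols) + (i : Int) * cols = c + ((i + 1 : Nat) : Int) * cols := by
        push_cast; ring
      have hpar : ((!rev) != decide (i % 2 = 1)) = (rev != decide ((i + 1) % 2 = 1)) := by
        have : (i + 1) % 2 = 1 ↔ ¬ (i % 2 = 1) := by omega
        by_cases hip : i % 2 = 1 <;> cases rev <;> simp [hip, this]
      rw [hoff, hpar]

lemma a_closed (rows cols start : Int) (hr : 0 < rows) (hc : 0 < cols) :
    create_zigzag rows cols start = (List.range rows.toNat).map (zrowR cols false start) := by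
  unfold create_zigzag
  rw [if_neg (by omega : ¬ rows = 0), if_neg (by omega : ¬ cols = 0)]
  have h : start + ((rows.toNat : Int)) * cols = start + rows * cols := by
    rw [Int.toNat_of_nonneg (le_of_lt hr)]
  have := rowsLoop cols (start + rows * cols) hc rows.toNat 0 [] false start h
  simpa using this

-- ===== VERDICT (by name: the statement is the Claim_ definition above) =====
theorem create_zigzag_spec : Claim_equal_create_zigzag := by
  intro rows cols start _hdom hpre
  unfold Spec_create_zigzag
  rw [alt_closed]
  by_cases hr : 0 < rows
  · by_cases hcz : cols = 0
    · subst hcz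
      unfold create_zigzag
      rw [if_neg (by omega : ¬ rows = 0), if_pos rfl]
      apply List.map_congr_left
      intro k _
      unfold zrowR
      simp [zseq]
    · exact a_closed rows cols start hr (by unfold Pre_create_zigzag at hpre; omega)
  · -- rows ≤ 0: both sides are []
    have hrt : rows.toNat = 0 := by omega
    rw [hrt]
    simp only [List.range_zero, List.map_nil]
    unfold create_zigzag
    by_cases hr0 : rows = 0
    · rw [if_pos hr0]
    · rw [if_neg hr0]
      by_cases hcz : cols = 0
      · rw [if_pos hcz, hrt]; simp
      · rw [if_neg hcz]
        have hc : 0 < cols := by unfold Pre_create_zigzag at hpre; omega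
        have hmax : start + rows * cols < start := by
          have h1 : rows ≤ -1 := by omega
          have h2 : rows * cols ≤ (-1) * cols := mul_le_mul_of_nonneg_right h1 (le_of_lt hc)
          linarith
        rw [hrt]
        simp only [Nat.zero_mul, Nat.zero_add]
        rw [createZigzagLoop, if_neg (not_le.mpr hmax)]
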